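-- pv_equiv track=rewrite | github.com/altr-r/cse221 | lab3/ordering_binary_tree.py | ordering_binary_tree
-- ===== SOURCE A (Python) =====
-- def ordering_binary_tree(arr, left, right):
--     res = []
--     if left > right:
--         return []
--
--     mid = (left + right) // 2
--
--     res.append(arr[mid])
--
--     arr1 = ordering_binary_tree(arr, left, mid - 1)
--     arr2 = ordering_binary_tree(arr, mid+1, right)
--
--     return res + arr1 + arr2
-- ===== SOURCE B (Python) =====
-- def ordering_binary_tree(arr, left, right):
--     res = []
--     stack = [(left, right)]
--     while stack:
--         l, r = stack.pop()
--         if l > r: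
--             continue
--         mid = (l + r) // 2
--         res.append(arr[mid])
--         stack.append((mid + 1, r))
--         stack.append((l, mid - 1))
--     return res
-- ===== Notes on version B (the rewrite author's own statement) =====
-- stated objective: alternative
-- what changed: Replaces A's recursion (with list concatenations res + arr1 + arr2) by an iterative loop over an explicit stack of (l, r) index ranges, appending each midpoint to one accumulator list; right ranges are pushed before left so the preorder is preserved.
import Mathlib
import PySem

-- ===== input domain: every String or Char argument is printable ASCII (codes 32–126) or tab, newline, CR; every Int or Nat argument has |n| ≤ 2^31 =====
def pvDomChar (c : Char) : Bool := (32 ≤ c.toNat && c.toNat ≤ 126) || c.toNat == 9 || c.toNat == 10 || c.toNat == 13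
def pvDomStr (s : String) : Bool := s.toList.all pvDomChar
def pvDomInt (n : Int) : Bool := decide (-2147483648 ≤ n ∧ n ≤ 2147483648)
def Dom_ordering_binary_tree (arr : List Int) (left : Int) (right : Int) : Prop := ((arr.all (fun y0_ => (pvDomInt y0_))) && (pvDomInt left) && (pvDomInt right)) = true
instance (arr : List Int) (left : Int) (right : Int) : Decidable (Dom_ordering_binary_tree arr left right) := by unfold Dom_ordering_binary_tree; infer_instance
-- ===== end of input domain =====

-- B replaces A's recursion by an iterative explicit stack of (l, r) ranges with one accumulator list (alternative decomposition, same preorder output).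

-- ===== PORT A =====
def ordering_binary_tree (arr : List Int) (left : Int) (right : Int) : List Int :=
  if _h : left > right then []
  else
    let mid := PySem.Int.floordiv (left + right) 2
    -- arr[mid]: Python indexing (negative wraps; IndexError excluded by Pre_)
    let res := [(PySem.List.pyGet? arr mid).getD 0]
    let arr1 := ordering_binary_tree arr left (mid - 1)
    let arr2 := ordering_binary_tree arr (mid + 1) right
    res ++ arr1 ++ arr2
termination_by (right - left + 1).toNat
decreasing_by
  · have := PySem.Int.floordiv_two_mid_bounds (lo := left) (hi := right) (by omega)
    omega
  · have := PySem.Int.floordiv_two_mid_bounds (lo := left) (hi := right) (by omega)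
    omega

-- ===== PORT B =====
-- Source B's while loop over the explicit stack; the Nat argument is only a totality
-- guard (fuel), always large enough (see obtFuel_big below), never reached.
def obtLoop (arr : List Int) : Nat → List (Int × Int) → List Int → List Int
  | 0, _, res => res
  | _ + 1, [], res => res
  | fuel + 1, p :: rest, res =>
    if p.1 > p.2 then obtLoop arr fuel rest res
    else
      let mid := PySem.Int.floordiv (p.1 + p.2) 2
      obtLoop arr fuel ((p.1, mid - 1) :: (mid + 1, p.2) :: rest)
        (res ++ [(PySem.List.pyGet? arr mid).getD 0])

def ordering_binary_tree_alt (arr : List Int) (left : Int) (right : Int) : List Int :=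
  obtLoop arr (3 * (right - left + 1).toNat + 1) [(left, right)] []

-- ===== PRECONDITION & SPEC =====
-- Pre_ is exactly the set of inputs on which the Python A returns (outside it, some
-- recursive call hits arr[mid] with mid out of Python's index range and A raises IndexError).
def Pre_ordering_binary_tree (arr : List Int) (left : Int) (right : Int) : Prop :=
  left > right ∨ (-(arr.length : Int) ≤ left ∧ right < (arr.length : Int))
instance (arr : List Int) (left : Int) (right : Int) : Decidable (Pre_ordering_binary_tree arr left right) := by unfold Pre_ordering_binary_tree; infer_instance

def pvWitness_ordering_binary_tree : List Int × Int × Int := ([3, 1, 4, 1, 5], 0, 4)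

def Spec_ordering_binary_tree (arr : List Int) (left : Int) (right : Int) (out : List Int) : Prop := out = ordering_binary_tree_alt arr left right
instance (arr : List Int) (left : Int) (right : Int) (out : List Int) : Decidable (Spec_ordering_binary_tree arr left right out) := by unfold Spec_ordering_binary_tree; infer_instance

-- ===== CLAIM (what is proved, stated in full; the proofs are below) =====
def Claim_equal_ordering_binary_tree : Prop := ∀ (arr : List Int) (left : Int) (right : Int), Dom_ordering_binary_tree arr left right → Pre_ordering_binary_tree arr left right → Spec_ordering_binary_tree arr left right (ordering_binary_tree arr left right)

-- ===== LEMMAS AND PROOFS =====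
-- weight of a stack entry; the stack's total weight bounds the remaining loop steps
def obtWeight (p : Int × Int) : Nat :=
  if p.1 > p.2 then 1 else 3 * (p.2 - p.1 + 1).toNat

-- Loop invariant: with enough fuel, the stack loop emits, after the accumulator,
-- exactly the preorder of each stacked range in order.
theorem obtLoop_eq (arr : List Int) : ∀ (fuel : Nat) (s : List (Int × Int)) (res : List Int),
    (s.map obtWeight).sum ≤ fuel →
    obtLoop arr fuel s res = res ++ (s.map (fun p => ordering_binary_tree arr p.1 p.2)).flatten := by
  intro fuel
  induction fuel with
  | zero =>
    intro s res h
    cases s with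
    | nil => simp [obtLoop]
    | cons p rest =>
      exfalso
      simp only [List.map_cons, List.sum_cons, obtWeight] at h
      split_ifs at h <;> omega
  | succ n ih =>
    intro s res h
    cases s with
    | nil => simp [obtLoop]
    | cons p rest =>
      obtain ⟨l, r⟩ := p
      by_cases hlr : l > r
      · rw [show obtLoop arr (n + 1) ((l, r) :: rest) res = obtLoop arr n rest res
          from by simp [obtLoop, hlr]]
        rw [ih rest res (by simp only [List.map_cons, List.sum_cons, obtWeight, if_pos hlr] at h; omega)]
        simp only [List.map_cons, List.flatten_cons]
        rw [ordering_binary_tree.eq_1]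
        simp [hlr]
      · have hfd : PySem.Int.floordiv (l + r) 2 = (l + r) / 2 :=
          PySem.Int.floordiv_eq_ediv_of_pos (by norm_num)
        have hmid : l ≤ (l + r) / 2 ∧ (l + r) / 2 ≤ r :=
          hfd ▸ PySem.Int.floordiv_two_mid_bounds (lo := l) (hi := r) (by omega)
        rw [show obtLoop arr (n + 1) ((l, r) :: rest) res
            = obtLoop arr n ((l, (l + r) / 2 - 1) :: ((l + r) / 2 + 1, r) :: rest)
                (res ++ [(PySem.List.pyGet? arr ((l + r) / 2)).getD 0])
          from by simp [obtLoop, hlr]]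
        rw [ih _ _ (by
          simp only [List.map_cons, List.sum_cons, obtWeight, if_neg hlr] at h ⊢
          split_ifs <;> omega)]
        simp only [List.map_cons, List.flatten_cons]
        rw [ordering_binary_tree.eq_1 arr l r]
        simp [hlr, List.append_assoc]

-- ===== VERDICT (by name: the statement is the Claim_ definition above) =====
theorem ordering_binary_tree_spec : Claim_equal_ordering_binary_tree := by
  intro arr left right _ _
  unfold Spec_ordering_binary_tree ordering_binary_tree_alt
  rw [obtLoop_eq arr _ [(left, right)] [] (by
    simp only [List.map_cons, List.map_nil, List.sum_cons, List.sum_nil, obtWeight]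
    split_ifs <;> omega)]
  simp
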